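-- pv_equiv track=rewrite | github.com/behenate/wdi-python-wiet | Zestaw_6/sudoku.py | convert_to_5
-- ===== SOURCE A (Python) =====
-- def convert_to_5(num):
--     _n = num
--     l = 0
--     while _n > 0:
--         _n //= 5
--         l += 1
--     t = [-1]*l
--     for i in range(l):
--         t[len(t)-i-1] = num%5
--         num //= 5
--     return t
-- ===== SOURCE B (Python) =====
-- def convert_to_5(num):
--     if num <= 0:
--         return []
--     return convert_to_5(num // 5) + [num % 5]
-- ===== Notes on version B (the rewrite author's own statement) =====
-- stated objective: simpler
-- what changed: Replaced A's two-pass scheme (count the digits, pre-allocate a [-1]*l array, fill it back-to-front by index) with a three-line recursion convert_to_5(num//5) + [num%5] with base case [] for num <= 0.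
import Mathlib
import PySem

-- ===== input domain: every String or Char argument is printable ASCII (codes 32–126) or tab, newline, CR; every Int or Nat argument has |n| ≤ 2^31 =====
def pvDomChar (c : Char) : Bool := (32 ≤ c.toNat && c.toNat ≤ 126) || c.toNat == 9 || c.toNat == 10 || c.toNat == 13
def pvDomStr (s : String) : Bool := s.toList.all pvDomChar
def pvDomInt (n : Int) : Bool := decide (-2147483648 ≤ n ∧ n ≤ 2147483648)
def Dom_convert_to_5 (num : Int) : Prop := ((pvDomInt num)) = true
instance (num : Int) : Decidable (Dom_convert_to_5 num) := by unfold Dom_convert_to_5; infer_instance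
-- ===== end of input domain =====

-- B replaces A's two-pass count-then-fill-by-index loop with a three-line recursion (objective: simpler).

-- ===== PORT A =====
-- the 'while _n > 0: _n //= 5; l += 1' counting loop
def pvCountLen (n : Int) : Nat :=
  if h : 0 < n then pvCountLen (PySem.Int.floordiv n 5) + 1 else 0
termination_by n.toNat
decreasing_by
  rw [PySem.Int.floordiv_eq_ediv_of_pos (by norm_num)]
  omega

-- one iteration of 'for i in range(l): t[len(t)-i-1] = num%5; num //= 5', state = (num, t)
def pvStepA (s : Int × List Int) (i : Int) : Int × List Int :=
  (PySem.Int.floordiv s.1 5,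
   PySem.List.pySetD s.2 ((s.2.length : Int) - i - 1) (PySem.Int.mod s.1 5))

def convert_to_5 (num : Int) : List Int :=
  let l := pvCountLen num
  let t : List Int := List.replicate l (-1)
  ((PySem.List.pyRange 0 (l : Int) 1).foldl pvStepA (num, t)).2

-- ===== PORT B =====
def convert_to_5_alt (num : Int) : List Int :=
  if _h : num ≤ 0 then []
  else convert_to_5_alt (PySem.Int.floordiv num 5) ++ [PySem.Int.mod num 5]
termination_by num.toNat
decreasing_by
  rw [PySem.Int.floordiv_eq_ediv_of_pos (by norm_num)]
  omega

-- ===== PRECONDITION & SPEC =====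
def Spec_convert_to_5 (num : Int) (out : List Int) : Prop := out = convert_to_5_alt num
instance (num : Int) (out : List Int) : Decidable (Spec_convert_to_5 num out) := by unfold Spec_convert_to_5; infer_instance

-- ===== CLAIM (what is proved, stated in full; the proofs are below) =====
def Claim_equal_convert_to_5 : Prop := ∀ (num : Int), Dom_convert_to_5 num → Spec_convert_to_5 num (convert_to_5 num)

-- ===== LEMMAS AND PROOFS =====

lemma pvStepA_len (s : Int × List Int) (i : Int) : ((pvStepA s i).2.length = s.2.length) := by
  simp [pvStepA, PySem.List.length_pySetD]

lemma foldA_length (r : List Int) : ∀ (s : Int × List Int),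
    ((r.foldl pvStepA s).2.length = s.2.length) := by
  induction r with
  | nil => intro s; rfl
  | cons a r ih => intro s; simp only [List.foldl_cons]; rw [ih]; exact pvStepA_len s a

-- The fill loop never touches the already-written suffix d: it splits off.
lemma foldA_append (cnt : Nat) : ∀ (num : Int) (v d : List Int), cnt ≤ v.length →
    (PySem.List.pyRange (d.length : Int) ((d.length : Int) + (cnt : Int)) 1).foldl pvStepA (num, v ++ d)
      = (((PySem.List.pyRange 0 (cnt : Int) 1).foldl pvStepA (num, v)).1,
         ((PySem.List.pyRange 0 (cnt : Int) 1).foldl pvStepA (num, v)).2 ++ d) := by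
  induction cnt with
  | zero =>
      intro num v d _
      rw [PySem.List.pyRange_one_eq_nil (by omega), PySem.List.pyRange_one_eq_nil (by omega)]
      rfl
  | succ cnt ih =>
      intro num v d hle
      have h1 : PySem.List.pyRange (d.length : Int) ((d.length : Int) + ((cnt+1 : Nat) : Int)) 1
          = PySem.List.pyRange (d.length : Int) ((d.length : Int) + (cnt : Int)) 1 ++ [(d.length : Int) + (cnt : Int)] := by
        have := PySem.List.pyRange_one_succ_right (a := (d.length : Int)) (b := (d.length : Int) + (cnt : Int)) (by omega)
        rw [show ((d.length : Int) + ((cnt+1 : Nat) : Int)) = ((d.length : Int) + (cnt : Int)) + 1 by omega]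
        exact this
      have h2 : PySem.List.pyRange 0 ((cnt+1 : Nat) : Int) 1
          = PySem.List.pyRange 0 (cnt : Int) 1 ++ [(cnt : Int)] := by
        have := PySem.List.pyRange_one_succ_right (a := (0:Int)) (b := (cnt : Int)) (by omega)
        rw [show (((cnt+1 : Nat)) : Int) = (cnt : Int) + 1 by omega]
        exact this
      rw [h1, h2, List.foldl_append, List.foldl_append, ih num v d (by omega)]
      set F := (PySem.List.pyRange 0 (cnt : Int) 1).foldl pvStepA (num, v) with hF
      have hlen : F.2.length = v.length := foldA_length _ _
      simp only [List.foldl_cons, List.foldl_nil]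
      have hidx1 : (((F.2 ++ d).length : Int) - ((d.length : Int) + (cnt : Int)) - 1)
          = ((v.length - cnt - 1 : Nat) : Int) := by
        simp [List.length_append, hlen]; omega
      have hidx2 : ((F.2.length : Int) - (cnt : Int) - 1) = ((v.length - cnt - 1 : Nat) : Int) := by
        rw [hlen]; omega
      simp only [pvStepA, hidx1, hidx2, PySem.List.pySetD_natCast]
      rw [List.set_append_left _ _ (by omega)]

lemma pvCountLen_zero {n : Int} (h : pvCountLen n = 0) : n ≤ 0 := by
  by_contra hc
  rw [pvCountLen] at h
  simp [show (0:Int) < n by omega] at h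

lemma pvCountLen_succ {n : Int} (h : 0 < n) :
    pvCountLen n = pvCountLen (PySem.Int.floordiv n 5) + 1 := by
  rw [pvCountLen]; simp [h]

lemma set_replicate_last (n : Nat) (x : Int) :
    (List.replicate (n+1) (-1 : Int)).set n x = List.replicate n (-1 : Int) ++ [x] := by
  rw [List.replicate_succ', List.set_append_right _ _ (by simp)]
  simp

lemma main_fill (n : Nat) : ∀ (num : Int), pvCountLen num = n →
    ((PySem.List.pyRange 0 (n : Int) 1).foldl pvStepA (num, List.replicate n (-1))).2
      = convert_to_5_alt num := by
  induction n with
  | zero =>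
      intro num h
      have := pvCountLen_zero h
      rw [convert_to_5_alt, PySem.List.pyRange_one_eq_nil (by omega)]
      simp [this]
  | succ n ih =>
      intro num h
      have hpos : 0 < num := by
        by_contra hc
        rw [pvCountLen] at h; simp [show ¬ (0:Int) < num by omega] at h
      have hrec : pvCountLen (PySem.Int.floordiv num 5) = n := by
        have := pvCountLen_succ hpos; omega
      rw [PySem.List.pyRange_one_cons (by push_cast; omega)]
      simp only [List.foldl_cons]
      have hset : pvStepA (num, List.replicate (n+1) (-1 : Int)) 0
          = (PySem.Int.floordiv num 5,
             List.replicate n (-1 : Int) ++ [PySem.Int.mod num 5]) := by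
        have hidx : (((List.replicate (n+1) (-1 : Int)).length : Int) - 0 - 1) = ((n : Nat) : Int) := by
          simp
        simp only [pvStepA, hidx, PySem.List.pySetD_natCast]
        rw [set_replicate_last]
      rw [show ((n+1 : Nat) : Int) = (((1:Int)) + (n : Int)) by push_cast; ring]
      rw [hset]

      have happ := foldA_append n (PySem.Int.floordiv num 5)
        (List.replicate n (-1 : Int)) [PySem.Int.mod num 5] (by simp)
      simp only [List.length_cons, List.length_nil, Nat.cast_one, zero_add] at happ ⊢
      rw [happ]
      simp only [ih _ hrec]
      show convert_to_5_alt (PySem.Int.floordiv num 5) ++ [PySem.Int.mod num 5] = convert_to_5_alt num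
      conv_rhs => rw [convert_to_5_alt]
      rw [dif_neg (show ¬ num ≤ 0 by omega)]

-- ===== VERDICT (by name: the statement is the Claim_ definition above) =====
theorem convert_to_5_spec : Claim_equal_convert_to_5 := by
  intro num _
  unfold Spec_convert_to_5 convert_to_5
  exact main_fill (pvCountLen num) num rfl
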